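-- pv_equiv track=rewrite | github.com/JoyceKL/Master_textsummarization | textclass.py | filter_list_tag
-- ===== SOURCE A (Python) =====
-- def filter_list_tag(textfiles):
--     filter_files = []
--     for text in textfiles:
--         if "P>" in text:
--             continue
--         elif "TEXT>" in text:
--             continue
--         elif "SUBJECT>" in text:
--             continue
--         elif "TYPE>" in text:
--             continue
--         elif "GRAPHIC>" in text:
--             continue
--         elif "XX>" in text:
--             continue
--         elif "CO>" in text:
--             continue
--         elif "CN>" in text:
--             continue
--         elif "IN>" in text:
--             continue
--         elif "PUB>" in text:
--             continue
--         elif "PAGE>" in text: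
--             continue
--         elif "HEAD>" in text:
--             continue
--         elif "BYLINE>" in text:
--             continue
--         elif "COUNTRY>" in text:
--             continue
--         elif "CITY>" in text:
--             continue
--         elif "EDITION>" in text:
--             continue
--         elif "CODE>" in text:
--             continue
--         elif "NAME>" in text:
--             continue
--         elif "PUBDATE>" in text:
--             continue
--         elif "DAY>" in text:
--             continue
--         elif "MONTH>" in text:
--             continue
--         elif "PG.COL>" in text:
--             continue
--         elif "PUBYEAR>" in text:
--             continue
--         elif "REGION>" in text:
--             continue
--         elif "FEATURE>" in text:
--             continue
--         elif "STATE>" in text: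
--             continue
--         elif "WORD.CT>" in text:
--             continue
--         elif "DATELINE>" in text:
--             continue
--         elif "COPYRGHT>" in text:
--             continue
--         elif "LIMLEN>" in text:
--             continue
--         elif "LANGUAGE>" in text:
--             continue
--         elif "NOTE>" in text:
--             continue
--         elif "TABLE>" in text:
--             continue
--         elif "ROWRULE>" in text:
--             continue
--         elif "TABLEROW>" in text:
--             continue
--         elif "CELLRULE>" in text:
--             continue
--         elif "TABLECELL>" in text:
--             continue
--         elif "F>" in text:
--             continue
--         filter_files.append(text)
--     return filter_files
-- ===== SOURCE B (Python) =====
-- # Single left-to-right scan per string: only at a '>' character do we test the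
-- # (at most 10-char) window ending there against a set of tags; every tag ends in '>'.
-- _TAGS = frozenset([
--     "P>", "TEXT>", "SUBJECT>", "TYPE>", "GRAPHIC>", "XX>", "CO>", "CN>", "IN>",
--     "PUB>", "PAGE>", "HEAD>", "BYLINE>", "COUNTRY>", "CITY>", "EDITION>",
--     "CODE>", "NAME>", "PUBDATE>", "DAY>", "MONTH>", "PG.COL>", "PUBYEAR>",
--     "REGION>", "FEATURE>", "STATE>", "WORD.CT>", "DATELINE>", "COPYRGHT>",
--     "LIMLEN>", "LANGUAGE>", "NOTE>", "TABLE>", "ROWRULE>", "TABLEROW>",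
--     "CELLRULE>", "TABLECELL>", "F>",
-- ])
--
--
-- def _has_tag(text):
--     for i in range(len(text)):
--         if text[i] == '>':
--             w = text[max(0, i - 9):i + 1]
--             for k in range(len(w)):
--                 if w[k:] in _TAGS:
--                     return True
--     return False
--
--
-- def filter_list_tag(textfiles):
--     return [text for text in textfiles if not _has_tag(text)]
-- ===== Notes on version B (the rewrite author's own statement) =====
-- stated objective: faster
-- what changed: Replaces the 38-branch elif chain of substring tests per string by a single left-to-right scan that only at each '>' character checks the suffixes of the at-most-10-character window ending there against a frozenset of tags (every tag ends in '>').
import Mathlib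
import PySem

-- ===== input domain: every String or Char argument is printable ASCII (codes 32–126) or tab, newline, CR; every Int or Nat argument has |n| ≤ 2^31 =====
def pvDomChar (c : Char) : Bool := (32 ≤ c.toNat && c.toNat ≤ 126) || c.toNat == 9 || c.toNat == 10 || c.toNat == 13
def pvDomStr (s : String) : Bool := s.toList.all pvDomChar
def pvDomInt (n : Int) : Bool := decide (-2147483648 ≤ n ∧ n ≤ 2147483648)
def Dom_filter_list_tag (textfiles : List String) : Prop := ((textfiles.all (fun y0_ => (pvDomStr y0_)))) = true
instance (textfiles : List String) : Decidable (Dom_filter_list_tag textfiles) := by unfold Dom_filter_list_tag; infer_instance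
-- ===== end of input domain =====

-- B replaces the 38 ordered substring tests per string by one scan that, at each '>',
-- tests the ≤10-char window ending there against the tag set (measured faster in a timing run).

-- ===== PORT A =====
def pvBodyA (filter_files : List String) (text : String) : List String :=
  if PySem.Str.isIn "P>" text then filter_files
  else if PySem.Str.isIn "TEXT>" text then filter_files
  else if PySem.Str.isIn "SUBJECT>" text then filter_files
  else if PySem.Str.isIn "TYPE>" text then filter_files
  else if PySem.Str.isIn "GRAPHIC>" text then filter_files
  else if PySem.Str.isIn "XX>" text then filter_files
  else if PySem.Str.isIn "CO>" text then filter_files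
  else if PySem.Str.isIn "CN>" text then filter_files
  else if PySem.Str.isIn "IN>" text then filter_files
  else if PySem.Str.isIn "PUB>" text then filter_files
  else if PySem.Str.isIn "PAGE>" text then filter_files
  else if PySem.Str.isIn "HEAD>" text then filter_files
  else if PySem.Str.isIn "BYLINE>" text then filter_files
  else if PySem.Str.isIn "COUNTRY>" text then filter_files
  else if PySem.Str.isIn "CITY>" text then filter_files
  else if PySem.Str.isIn "EDITION>" text then filter_files
  else if PySem.Str.isIn "CODE>" text then filter_files
  else if PySem.Str.isIn "NAME>" text then filter_files
  else if PySem.Str.isIn "PUBDATE>" text then filter_files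
  else if PySem.Str.isIn "DAY>" text then filter_files
  else if PySem.Str.isIn "MONTH>" text then filter_files
  else if PySem.Str.isIn "PG.COL>" text then filter_files
  else if PySem.Str.isIn "PUBYEAR>" text then filter_files
  else if PySem.Str.isIn "REGION>" text then filter_files
  else if PySem.Str.isIn "FEATURE>" text then filter_files
  else if PySem.Str.isIn "STATE>" text then filter_files
  else if PySem.Str.isIn "WORD.CT>" text then filter_files
  else if PySem.Str.isIn "DATELINE>" text then filter_files
  else if PySem.Str.isIn "COPYRGHT>" text then filter_files
  else if PySem.Str.isIn "LIMLEN>" text then filter_files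
  else if PySem.Str.isIn "LANGUAGE>" text then filter_files
  else if PySem.Str.isIn "NOTE>" text then filter_files
  else if PySem.Str.isIn "TABLE>" text then filter_files
  else if PySem.Str.isIn "ROWRULE>" text then filter_files
  else if PySem.Str.isIn "TABLEROW>" text then filter_files
  else if PySem.Str.isIn "CELLRULE>" text then filter_files
  else if PySem.Str.isIn "TABLECELL>" text then filter_files
  else if PySem.Str.isIn "F>" text then filter_files
  else filter_files ++ [text]

def filter_list_tag (textfiles : List String) : List String :=
  textfiles.foldl pvBodyA []

-- ===== PORT B =====
def pvTags : List (List Char) := [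
  ['P', '>'],
  ['T', 'E', 'X', 'T', '>'],
  ['S', 'U', 'B', 'J', 'E', 'C', 'T', '>'],
  ['T', 'Y', 'P', 'E', '>'],
  ['G', 'R', 'A', 'P', 'H', 'I', 'C', '>'],
  ['X', 'X', '>'],
  ['C', 'O', '>'],
  ['C', 'N', '>'],
  ['I', 'N', '>'],
  ['P', 'U', 'B', '>'],
  ['P', 'A', 'G', 'E', '>'],
  ['H', 'E', 'A', 'D', '>'],
  ['B', 'Y', 'L', 'I', 'N', 'E', '>'],
  ['C', 'O', 'U', 'N', 'T', 'R', 'Y', '>'],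
  ['C', 'I', 'T', 'Y', '>'],
  ['E', 'D', 'I', 'T', 'I', 'O', 'N', '>'],
  ['C', 'O', 'D', 'E', '>'],
  ['N', 'A', 'M', 'E', '>'],
  ['P', 'U', 'B', 'D', 'A', 'T', 'E', '>'],
  ['D', 'A', 'Y', '>'],
  ['M', 'O', 'N', 'T', 'H', '>'],
  ['P', 'G', '.', 'C', 'O', 'L', '>'],
  ['P', 'U', 'B', 'Y', 'E', 'A', 'R', '>'],
  ['R', 'E', 'G', 'I', 'O', 'N', '>'],
  ['F', 'E', 'A', 'T', 'U', 'R', 'E', '>'],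
  ['S', 'T', 'A', 'T', 'E', '>'],
  ['W', 'O', 'R', 'D', '.', 'C', 'T', '>'],
  ['D', 'A', 'T', 'E', 'L', 'I', 'N', 'E', '>'],
  ['C', 'O', 'P', 'Y', 'R', 'G', 'H', 'T', '>'],
  ['L', 'I', 'M', 'L', 'E', 'N', '>'],
  ['L', 'A', 'N', 'G', 'U', 'A', 'G', 'E', '>'],
  ['N', 'O', 'T', 'E', '>'],
  ['T', 'A', 'B', 'L', 'E', '>'],
  ['R', 'O', 'W', 'R', 'U', 'L', 'E', '>'],
  ['T', 'A', 'B', 'L', 'E', 'R', 'O', 'W', '>'],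
  ['C', 'E', 'L', 'L', 'R', 'U', 'L', 'E', '>'],
  ['T', 'A', 'B', 'L', 'E', 'C', 'E', 'L', 'L', '>'],
  ['F', '>']]

-- _has_tag(text): at each '>' character, test every suffix of the ≤10-char window ending there
def pvHasTag (cs : List Char) : Bool :=
  (List.range cs.length).any (fun i =>
    cs.getD i ' ' == '>' &&
    (List.range ((cs.take (i+1)).drop (i-9)).length).any (fun k =>
      pvTags.contains (((cs.take (i+1)).drop (i-9)).drop k)))

def filter_list_tag_alt (textfiles : List String) : List String :=
  textfiles.filter (fun text => !pvHasTag text.toList)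

-- ===== PRECONDITION & SPEC =====
def Spec_filter_list_tag (textfiles : List String) (out : List String) : Prop := out = filter_list_tag_alt textfiles
instance (textfiles : List String) (out : List String) : Decidable (Spec_filter_list_tag textfiles out) := by unfold Spec_filter_list_tag; infer_instance

-- ===== CLAIM (what is proved, stated in full; the proofs are below) =====
def Claim_equal_filter_list_tag : Prop := ∀ (textfiles : List String), Dom_filter_list_tag textfiles → Spec_filter_list_tag textfiles (filter_list_tag textfiles)

-- ===== LEMMAS AND PROOFS =====

lemma pvTags_facts : ∀ t ∈ pvTags, 1 ≤ t.length ∧ t.length ≤ 10 ∧ t.getD (t.length - 1) ' ' = '>' := by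
  decide

-- if pvHasTag fires, some tag is an infix of cs (a window suffix is an infix)
lemma pvHasTag_sound (cs : List Char) (h : pvHasTag cs = true) : ∃ t ∈ pvTags, t <:+: cs := by
  simp only [pvHasTag, List.any_eq_true, List.mem_range, Bool.and_eq_true, beq_iff_eq] at h
  obtain ⟨i, _, _, k, _, hmem⟩ := h
  refine ⟨((cs.take (i+1)).drop (i-9)).drop k, (List.contains_iff_mem).mp hmem, ?_⟩
  exact ((List.drop_suffix _ _).isInfix).trans
    (((List.drop_suffix _ _).isInfix).trans ((List.take_prefix _ _).isInfix))

-- every tag occurrence ends at a '>', so pvHasTag finds it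
lemma pvHasTag_complete (t cs : List Char) (ht : t ∈ pvTags) (hinf : t <:+: cs) :
    pvHasTag cs = true := by
  obtain ⟨hlen1, hlen10, hlast⟩ := pvTags_facts t ht
  obtain ⟨u, v, rfl⟩ := hinf
  simp only [pvHasTag, List.any_eq_true, List.mem_range, Bool.and_eq_true, beq_iff_eq]
  refine ⟨u.length + t.length - 1, ?_, ?_, ?_⟩
  · simp only [List.length_append]; omega
  · have hlt : u.length + t.length - 1 < (u ++ t).length := by simp only [List.length_append]; omega
    rw [List.getD_append _ _ _ _ hlt,
        List.getD_append_right _ _ _ _ (show u.length ≤ u.length + t.length - 1 by omega)]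
    have hidx : u.length + t.length - 1 - u.length = t.length - 1 := by omega
    rw [hidx]; exact hlast
  · have htake : (u ++ t ++ v).take (u.length + t.length - 1 + 1) = u ++ t := by
      have h : u.length + t.length - 1 + 1 = (u ++ t).length := by
        simp only [List.length_append]; omega
      rw [h, List.take_left]
    rw [htake]
    refine ⟨u.length - (u.length + t.length - 1 - 9), ?_, ?_⟩
    · simp only [List.length_drop, List.length_append]; omega
    · have key : ((u ++ t).drop (u.length + t.length - 1 - 9)).drop
          (u.length - (u.length + t.length - 1 - 9)) = t := by
        rw [List.drop_drop]
        have h : u.length + t.length - 1 - 9 + (u.length - (u.length + t.length - 1 - 9)) =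
            u.length := by omega
        rw [h, List.drop_left]
      rw [key]
      exact (List.contains_iff_mem).mpr ht

lemma pvHasTag_false_iff (cs : List Char) :
    pvHasTag cs = false ↔ ∀ t ∈ pvTags, ¬ t <:+: cs := by
  constructor
  · intro h t ht hinf
    rw [pvHasTag_complete t cs ht hinf] at h; exact absurd h (by simp)
  · intro h
    cases hb : pvHasTag cs with
    | false => rfl
    | true =>
      obtain ⟨t, ht, hinf⟩ := pvHasTag_sound cs hb
      exact absurd hinf (h t ht)

lemma pvBodyA_keep (text : String) (acc : List String)
    (h : ∀ t ∈ pvTags, ¬ t <:+: text.toList) : pvBodyA acc text = acc ++ [text] := by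
  have hall : ∀ (sub : String), sub.toList ∈ pvTags → PySem.Str.isIn sub text = false := by
    intro sub hs
    rw [← Bool.not_eq_true, PySem.Str.isIn_iff_infix]
    exact h sub.toList hs
  rw [pvBodyA,
    hall "P>" (by decide),
    hall "TEXT>" (by decide),
    hall "SUBJECT>" (by decide),
    hall "TYPE>" (by decide),
    hall "GRAPHIC>" (by decide),
    hall "XX>" (by decide),
    hall "CO>" (by decide),
    hall "CN>" (by decide),
    hall "IN>" (by decide),
    hall "PUB>" (by decide),
    hall "PAGE>" (by decide),
    hall "HEAD>" (by decide),
    hall "BYLINE>" (by decide),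
    hall "COUNTRY>" (by decide),
    hall "CITY>" (by decide),
    hall "EDITION>" (by decide),
    hall "CODE>" (by decide),
    hall "NAME>" (by decide),
    hall "PUBDATE>" (by decide),
    hall "DAY>" (by decide),
    hall "MONTH>" (by decide),
    hall "PG.COL>" (by decide),
    hall "PUBYEAR>" (by decide),
    hall "REGION>" (by decide),
    hall "FEATURE>" (by decide),
    hall "STATE>" (by decide),
    hall "WORD.CT>" (by decide),
    hall "DATELINE>" (by decide),
    hall "COPYRGHT>" (by decide),
    hall "LIMLEN>" (by decide),
    hall "LANGUAGE>" (by decide),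
    hall "NOTE>" (by decide),
    hall "TABLE>" (by decide),
    hall "ROWRULE>" (by decide),
    hall "TABLEROW>" (by decide),
    hall "CELLRULE>" (by decide),
    hall "TABLECELL>" (by decide),
    hall "F>" (by decide)]
  simp

lemma pvBodyA_drop (text : String) (acc : List String)
    (h : ∃ t ∈ pvTags, t <:+: text.toList) : pvBodyA acc text = acc := by
  rw [pvBodyA]
  by_cases h1 : PySem.Str.isIn "P>" text = true
  · rw [if_pos h1]
  rw [if_neg h1]
  by_cases h2 : PySem.Str.isIn "TEXT>" text = true
  · rw [if_pos h2]
  rw [if_neg h2]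
  by_cases h3 : PySem.Str.isIn "SUBJECT>" text = true
  · rw [if_pos h3]
  rw [if_neg h3]
  by_cases h4 : PySem.Str.isIn "TYPE>" text = true
  · rw [if_pos h4]
  rw [if_neg h4]
  by_cases h5 : PySem.Str.isIn "GRAPHIC>" text = true
  · rw [if_pos h5]
  rw [if_neg h5]
  by_cases h6 : PySem.Str.isIn "XX>" text = true
  · rw [if_pos h6]
  rw [if_neg h6]
  by_cases h7 : PySem.Str.isIn "CO>" text = true
  · rw [if_pos h7]
  rw [if_neg h7]
  by_cases h8 : PySem.Str.isIn "CN>" text = true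
  · rw [if_pos h8]
  rw [if_neg h8]
  by_cases h9 : PySem.Str.isIn "IN>" text = true
  · rw [if_pos h9]
  rw [if_neg h9]
  by_cases h10 : PySem.Str.isIn "PUB>" text = true
  · rw [if_pos h10]
  rw [if_neg h10]
  by_cases h11 : PySem.Str.isIn "PAGE>" text = true
  · rw [if_pos h11]
  rw [if_neg h11]
  by_cases h12 : PySem.Str.isIn "HEAD>" text = true
  · rw [if_pos h12]
  rw [if_neg h12]
  by_cases h13 : PySem.Str.isIn "BYLINE>" text = true
  · rw [if_pos h13]
  rw [if_neg h13]
  by_cases h14 : PySem.Str.isIn "COUNTRY>" text = true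
  · rw [if_pos h14]
  rw [if_neg h14]
  by_cases h15 : PySem.Str.isIn "CITY>" text = true
  · rw [if_pos h15]
  rw [if_neg h15]
  by_cases h16 : PySem.Str.isIn "EDITION>" text = true
  · rw [if_pos h16]
  rw [if_neg h16]
  by_cases h17 : PySem.Str.isIn "CODE>" text = true
  · rw [if_pos h17]
  rw [if_neg h17]
  by_cases h18 : PySem.Str.isIn "NAME>" text = true
  · rw [if_pos h18]
  rw [if_neg h18]
  by_cases h19 : PySem.Str.isIn "PUBDATE>" text = true
  · rw [if_pos h19]
  rw [if_neg h19]
  by_cases h20 : PySem.Str.isIn "DAY>" text = true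
  · rw [if_pos h20]
  rw [if_neg h20]
  by_cases h21 : PySem.Str.isIn "MONTH>" text = true
  · rw [if_pos h21]
  rw [if_neg h21]
  by_cases h22 : PySem.Str.isIn "PG.COL>" text = true
  · rw [if_pos h22]
  rw [if_neg h22]
  by_cases h23 : PySem.Str.isIn "PUBYEAR>" text = true
  · rw [if_pos h23]
  rw [if_neg h23]
  by_cases h24 : PySem.Str.isIn "REGION>" text = true
  · rw [if_pos h24]
  rw [if_neg h24]
  by_cases h25 : PySem.Str.isIn "FEATURE>" text = true
  · rw [if_pos h25]
  rw [if_neg h25]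
  by_cases h26 : PySem.Str.isIn "STATE>" text = true
  · rw [if_pos h26]
  rw [if_neg h26]
  by_cases h27 : PySem.Str.isIn "WORD.CT>" text = true
  · rw [if_pos h27]
  rw [if_neg h27]
  by_cases h28 : PySem.Str.isIn "DATELINE>" text = true
  · rw [if_pos h28]
  rw [if_neg h28]
  by_cases h29 : PySem.Str.isIn "COPYRGHT>" text = true
  · rw [if_pos h29]
  rw [if_neg h29]
  by_cases h30 : PySem.Str.isIn "LIMLEN>" text = true
  · rw [if_pos h30]
  rw [if_neg h30]
  by_cases h31 : PySem.Str.isIn "LANGUAGE>" text = true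
  · rw [if_pos h31]
  rw [if_neg h31]
  by_cases h32 : PySem.Str.isIn "NOTE>" text = true
  · rw [if_pos h32]
  rw [if_neg h32]
  by_cases h33 : PySem.Str.isIn "TABLE>" text = true
  · rw [if_pos h33]
  rw [if_neg h33]
  by_cases h34 : PySem.Str.isIn "ROWRULE>" text = true
  · rw [if_pos h34]
  rw [if_neg h34]
  by_cases h35 : PySem.Str.isIn "TABLEROW>" text = true
  · rw [if_pos h35]
  rw [if_neg h35]
  by_cases h36 : PySem.Str.isIn "CELLRULE>" text = true
  · rw [if_pos h36]
  rw [if_neg h36]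
  by_cases h37 : PySem.Str.isIn "TABLECELL>" text = true
  · rw [if_pos h37]
  rw [if_neg h37]
  by_cases h38 : PySem.Str.isIn "F>" text = true
  · rw [if_pos h38]
  rw [if_neg h38]
  exfalso
  obtain ⟨t, ht, hinf⟩ := h
  simp only [pvTags, List.mem_cons, List.not_mem_nil, or_false] at ht
  rcases ht with rfl|rfl|rfl|rfl|rfl|rfl|rfl|rfl|rfl|rfl|rfl|rfl|rfl|rfl|rfl|rfl|rfl|rfl|rfl|rfl|rfl|rfl|rfl|rfl|rfl|rfl|rfl|rfl|rfl|rfl|rfl|rfl|rfl|rfl|rfl|rfl|rfl|rfl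
  · rw [PySem.Str.isIn_iff_infix] at h1; exact h1 hinf
  · rw [PySem.Str.isIn_iff_infix] at h2; exact h2 hinf
  · rw [PySem.Str.isIn_iff_infix] at h3; exact h3 hinf
  · rw [PySem.Str.isIn_iff_infix] at h4; exact h4 hinf
  · rw [PySem.Str.isIn_iff_infix] at h5; exact h5 hinf
  · rw [PySem.Str.isIn_iff_infix] at h6; exact h6 hinf
  · rw [PySem.Str.isIn_iff_infix] at h7; exact h7 hinf
  · rw [PySem.Str.isIn_iff_infix] at h8; exact h8 hinf
  · rw [PySem.Str.isIn_iff_infix] at h9; exact h9 hinf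
  · rw [PySem.Str.isIn_iff_infix] at h10; exact h10 hinf
  · rw [PySem.Str.isIn_iff_infix] at h11; exact h11 hinf
  · rw [PySem.Str.isIn_iff_infix] at h12; exact h12 hinf
  · rw [PySem.Str.isIn_iff_infix] at h13; exact h13 hinf
  · rw [PySem.Str.isIn_iff_infix] at h14; exact h14 hinf
  · rw [PySem.Str.isIn_iff_infix] at h15; exact h15 hinf
  · rw [PySem.Str.isIn_iff_infix] at h16; exact h16 hinf
  · rw [PySem.Str.isIn_iff_infix] at h17; exact h17 hinf
  · rw [PySem.Str.isIn_iff_infix] at h18; exact h18 hinf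
  · rw [PySem.Str.isIn_iff_infix] at h19; exact h19 hinf
  · rw [PySem.Str.isIn_iff_infix] at h20; exact h20 hinf
  · rw [PySem.Str.isIn_iff_infix] at h21; exact h21 hinf
  · rw [PySem.Str.isIn_iff_infix] at h22; exact h22 hinf
  · rw [PySem.Str.isIn_iff_infix] at h23; exact h23 hinf
  · rw [PySem.Str.isIn_iff_infix] at h24; exact h24 hinf
  · rw [PySem.Str.isIn_iff_infix] at h25; exact h25 hinf
  · rw [PySem.Str.isIn_iff_infix] at h26; exact h26 hinf
  · rw [PySem.Str.isIn_iff_infix] at h27; exact h27 hinf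
  · rw [PySem.Str.isIn_iff_infix] at h28; exact h28 hinf
  · rw [PySem.Str.isIn_iff_infix] at h29; exact h29 hinf
  · rw [PySem.Str.isIn_iff_infix] at h30; exact h30 hinf
  · rw [PySem.Str.isIn_iff_infix] at h31; exact h31 hinf
  · rw [PySem.Str.isIn_iff_infix] at h32; exact h32 hinf
  · rw [PySem.Str.isIn_iff_infix] at h33; exact h33 hinf
  · rw [PySem.Str.isIn_iff_infix] at h34; exact h34 hinf
  · rw [PySem.Str.isIn_iff_infix] at h35; exact h35 hinf
  · rw [PySem.Str.isIn_iff_infix] at h36; exact h36 hinf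
  · rw [PySem.Str.isIn_iff_infix] at h37; exact h37 hinf
  · rw [PySem.Str.isIn_iff_infix] at h38; exact h38 hinf

lemma foldl_bodyA (l : List String) (acc : List String) :
    l.foldl pvBodyA acc = acc ++ l.filter (fun s => !pvHasTag s.toList) := by
  induction l generalizing acc with
  | nil => simp
  | cons s rest ih =>
    cases hb : pvHasTag s.toList with
    | true =>
      have hd := pvHasTag_sound s.toList hb
      simp only [List.foldl_cons, List.filter_cons, hb, Bool.not_true, pvBodyA_drop s acc hd]
      exact ih acc
    | false =>
      have hk := (pvHasTag_false_iff s.toList).mp hb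
      simp only [List.foldl_cons, List.filter_cons, hb, Bool.not_false, pvBodyA_keep s acc hk]
      rw [ih]; simp

-- ===== VERDICT (by name: the statement is the Claim_ definition above) =====
theorem filter_list_tag_spec : Claim_equal_filter_list_tag := by
  intro textfiles _
  unfold Spec_filter_list_tag filter_list_tag filter_list_tag_alt
  rw [foldl_bodyA]; simp
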